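-- pv_equiv track=rewrite | github.com/restitux/w4-tiled-converter | w4_tiled_converter/tilemap.py | make_collision_data_str
-- ===== SOURCE A (Python) =====
-- def make_collision_data_str(data):
--     binary_data = [0 if d == 0 else 1 for d in data]
--     out = []
--     for i in range(0, len(binary_data), 8):
--         b = binary_data[i : i + 8]
--         b.reverse()  # lsb should be 0 index
--         b_str = "".join([str(bit) for bit in b])
--         out.append(f"0b{b_str}")
--     return ", ".join(out)
-- ===== SOURCE B (Python) =====
-- def make_collision_data_str(data):
--     parts = []
--     for i in range(0, len(data), 8):
--         chunk = data[i : i + 8]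
--         value = 0
--         for k, d in enumerate(chunk):
--             if d != 0:
--                 value += 1 << k
--         parts.append("0b" + format(value, "b").zfill(len(chunk)))
--     return ", ".join(parts)
-- ===== Notes on version B (the rewrite author's own statement) =====
-- stated objective: idiomatic
-- what changed: Each 8-element chunk's bits are accumulated into an integer (value += 1 << k) which is then binary-formatted zero-padded to the chunk length, instead of building a reversed list of bit characters and joining them.
import Mathlib
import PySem

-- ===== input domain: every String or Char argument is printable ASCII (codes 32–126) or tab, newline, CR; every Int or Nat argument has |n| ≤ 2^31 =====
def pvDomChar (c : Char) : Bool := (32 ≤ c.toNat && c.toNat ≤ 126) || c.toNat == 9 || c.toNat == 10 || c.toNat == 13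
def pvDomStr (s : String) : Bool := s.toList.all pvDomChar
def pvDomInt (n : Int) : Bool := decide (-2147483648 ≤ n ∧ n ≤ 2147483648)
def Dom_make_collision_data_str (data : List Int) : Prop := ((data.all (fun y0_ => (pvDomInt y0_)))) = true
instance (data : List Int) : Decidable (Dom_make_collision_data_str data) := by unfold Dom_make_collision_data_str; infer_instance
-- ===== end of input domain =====

-- B formats each 8-element chunk numerically (accumulate an integer, then binary-format zero-padded
-- to the chunk length) instead of A's reverse-and-join of bit characters; objective: idiomatic.


-- ===== PORT A =====
def make_collision_data_str (data : List Int) : String :=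
  let binary_data := data.map (fun d => if d == 0 then (0 : Int) else 1)
  let out := (PySem.List.pyRange 0 binary_data.length 8).foldl
    (fun out i =>
      let b := PySem.List.slice binary_data (some i) (some (i + 8))
      let b := b.reverse
      let b_str := PySem.Str.join "" (b.map PySem.Int.toStr)
      out ++ ["0b" ++ b_str]) []
  PySem.Str.join ", " out

-- ===== PORT B =====
-- 'value += 1 << k' : the enumerate index k is ≥ 0, so '.toNat' is exact here
def make_collision_data_str_alt (data : List Int) : String :=
  let parts := (PySem.List.pyRange 0 data.length 8).foldl
    (fun parts i =>
      let chunk := PySem.List.slice data (some i) (some (i + 8))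
      let value := (PySem.List.enumerate chunk).foldl
        (fun (v : Int) (kd : Int × Int) => if kd.2 != 0 then v + (1 : Int) <<< kd.1.toNat else v) 0
      -- format(value, "b").zfill(len(chunk)) ; value ≥ 0 always, where both are exact
      parts ++ ["0b" ++ PySem.Str.zfill (PySem.Int.toBin value) (chunk.length : Int)]) []
  PySem.Str.join ", " parts

-- ===== PRECONDITION & SPEC =====
def Spec_make_collision_data_str (data : List Int) (out : String) : Prop := out = make_collision_data_str_alt data
instance (data : List Int) (out : String) : Decidable (Spec_make_collision_data_str data out) := by unfold Spec_make_collision_data_str; infer_instance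

-- ===== CLAIM (what is proved, stated in full; the proofs are below) =====
def Claim_equal_make_collision_data_str : Prop := ∀ (data : List Int), Dom_make_collision_data_str data → Spec_make_collision_data_str data (make_collision_data_str data)

-- ===== LEMMAS AND PROOFS =====

-- the bit character A appends for an input element, and the numeric value of a chunk (lsb first)
def pvBitChar (d : Int) : Char := if d = 0 then '0' else '1'
def pvVal : List Int → Nat
  | [] => 0
  | d :: t => (if d = 0 then 0 else 1) + 2 * pvVal t

-- B's enumerate loop computes pvVal
lemma enum_foldl_eq_pvVal (cs : List Int) : ∀ (o a : Int), 0 ≤ o →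
    (PySem.List.enumerate cs o).foldl
      (fun (v : Int) (kd : Int × Int) => if kd.2 != 0 then v + (1 : Int) <<< kd.1.toNat else v) a
    = a + 2 ^ o.toNat * (pvVal cs : Int) := by
  induction cs with
  | nil => intro o a _; simp [PySem.List.enumerate, pvVal]
  | cons d t ih =>
    intro o a ho
    have h1 : (o + 1).toNat = o.toNat + 1 := by omega
    simp only [PySem.List.enumerate, List.foldl_cons]
    rw [ih (o + 1) _ (by omega), h1]
    by_cases hd : d = 0 <;>
      simp only [pvVal, hd, if_pos, bne_self_eq_false, Bool.false_eq_true, if_false] <;>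
      simp [hd, Int.shiftLeft_eq, pow_succ] <;> ring

-- Nat.toDigitsCore: the accumulator is just appended
lemma toDigitsCore_acc (fuel : Nat) : ∀ (n : Nat) (ds : List Char),
    Nat.toDigitsCore 2 fuel n ds = Nat.toDigitsCore 2 fuel n [] ++ ds := by
  induction fuel with
  | zero => intro n ds; simp [Nat.toDigitsCore]
  | succ f ih =>
    intro n ds
    simp only [Nat.toDigitsCore]
    by_cases h : n / 2 = 0
    · simp [h]
    · simp only [if_neg h]
      rw [ih (n / 2) [(n % 2).digitChar], ih (n / 2) ((n % 2).digitChar :: ds)]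
      simp

-- Nat.toDigitsCore: any sufficient fuel gives the same digits
lemma toDigitsCore_fuel (n : Nat) : ∀ (fuel fuel' : Nat) (ds : List Char),
    n < fuel → n < fuel' → Nat.toDigitsCore 2 fuel n ds = Nat.toDigitsCore 2 fuel' n ds := by
  induction n using Nat.strong_induction_on with
  | _ n ih =>
    intro fuel fuel' ds h h'
    obtain ⟨f, rfl⟩ : ∃ f, fuel = f + 1 := ⟨fuel - 1, by omega⟩
    obtain ⟨f', rfl⟩ : ∃ f', fuel' = f' + 1 := ⟨fuel' - 1, by omega⟩
    simp only [Nat.toDigitsCore]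
    by_cases hz : n / 2 = 0
    · simp [hz]
    · simp only [if_neg hz]
      exact ih (n / 2) (by omega) f f' _ (by omega) (by omega)

-- appending one binary digit
lemma toDigits_step (v b : Nat) (hv : 1 ≤ v) (hb : b < 2) :
    Nat.toDigits 2 (b + 2 * v) = Nat.toDigits 2 v ++ [Nat.digitChar b] := by
  have hm : (b + 2 * v) / 2 = v := by omega
  have hr : (b + 2 * v) % 2 = b := by omega
  have hnz : v ≠ 0 := by omega
  conv_lhs => simp only [Nat.toDigits, Nat.toDigitsCore, hm, hr, if_neg hnz]
  rw [toDigitsCore_acc, toDigitsCore_fuel v (b + 2 * v) (v + 1) [] (by omega) (by omega)]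
  rfl

lemma toDigits_ne_nil (n : Nat) : Nat.toDigits 2 n ≠ [] := by
  simp only [Nat.toDigits, Nat.toDigitsCore]
  by_cases hz : n / 2 = 0
  · simp [hz]
  · simp only [if_neg hz]
    rw [toDigitsCore_acc]
    simp

-- the padded binary digits of a chunk's value are A's reversed bit characters
lemma toDigits_pad (cs : List Int) : cs ≠ [] →
    List.replicate (cs.length - (Nat.toDigits 2 (pvVal cs)).length) '0' ++ Nat.toDigits 2 (pvVal cs)
      = (cs.map pvBitChar).reverse := by
  induction cs with
  | nil => intro h; exact absurd rfl h
  | cons d t ih =>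
    intro _
    have hdig : Nat.toDigits 2 (if d = 0 then 0 else 1) = [pvBitChar d] := by
      by_cases hd : d = 0 <;> simp [hd, pvBitChar] <;> rfl
    rcases ht : t with _ | ⟨e, u⟩
    · simp [pvVal, hdig]
    · rw [← ht]
      have htne : t ≠ [] := by rw [ht]; simp
      have iht := ih htne
      have hlen : t.length = u.length + 1 := by rw [ht]; rfl
      by_cases hv : pvVal t = 0
      · have h0 : Nat.toDigits 2 (pvVal t) = ['0'] := by rw [hv]; rfl
        have hval : pvVal (d :: t) = (if d = 0 then 0 else 1) := by simp [pvVal, hv]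
        rw [h0] at iht
        have key : List.replicate t.length '0' ++ [pvBitChar d]
            = (List.map pvBitChar (d :: t)).reverse := by
          rw [List.map_cons, List.reverse_cons, ← iht, hlen]
          simp [List.replicate_succ']
        rw [hval, hdig]
        simpa using key
      · have hval : pvVal (d :: t) = (if d = 0 then 0 else 1) + 2 * pvVal t := rfl
        have hb2 : (if d = 0 then 0 else 1) < 2 := by by_cases hd : d = 0 <;> simp [hd]
        have hc : Nat.digitChar (if d = 0 then 0 else 1) = pvBitChar d := by
          by_cases hd : d = 0 <;> simp [hd, pvBitChar] <;> rfl
        rw [hval, toDigits_step (pvVal t) _ (by omega) hb2, hc]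
        have hlen2 : (d :: t).length - (Nat.toDigits 2 (pvVal t) ++ [pvBitChar d]).length
            = t.length - (Nat.toDigits 2 (pvVal t)).length := by
          simp only [List.length_append, List.length_cons, List.length_nil]
          omega
        rw [hlen2, List.map_cons, List.reverse_cons, ← iht]
        simp

-- zfill on a string not starting with a sign is a plain left pad
lemma zfill_nosign (c : Char) (rest : List Char) (w : Int) (hc : ¬(c = '+' ∨ c = '-')) :
    PySem.Chars.zfill (c :: rest) w
      = List.replicate (w.toNat - (c :: rest).length) '0' ++ c :: rest := by
  unfold PySem.Chars.zfill
  by_cases hw : w ≤ ((c :: rest).length : Int)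
  · rw [if_pos hw]
    have h0 : w.toNat - (c :: rest).length = 0 := by simp only [List.length_cons] at *; omega
    rw [h0]
    simp
  · rw [if_neg hw]
    split
    next c1 rest1 heq =>
      injection heq with h1 h2
      subst h1; subst h2
      rw [if_neg hc]
    next heq => simp at heq

-- zfill of the binary digits is exactly that padding
lemma zfill_toDigits (cs : List Int) (h : cs ≠ []) :
    PySem.Chars.zfill (Nat.toDigits 2 (pvVal cs)) (cs.length : Int)
      = (cs.map pvBitChar).reverse := by
  have hpad := toDigits_pad cs h
  rcases hsne : Nat.toDigits 2 (pvVal cs) with _ | ⟨c, rest⟩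
  · exact absurd hsne (toDigits_ne_nil _)
  · rw [hsne] at hpad
    have hcmem : c ∈ (cs.map pvBitChar).reverse := by rw [← hpad]; simp
    have hc01 : c = '0' ∨ c = '1' := by
      simp only [List.mem_reverse, List.mem_map] at hcmem
      obtain ⟨d, -, hd⟩ := hcmem
      by_cases h0 : d = 0
      · left; rw [← hd]; simp [pvBitChar, h0]
      · right; rw [← hd]; simp [pvBitChar, h0]
    have hcne : ¬(c = '+' ∨ c = '-') := by rcases hc01 with h' | h' <;> subst h' <;> decide
    rw [zfill_nosign c rest _ hcne]
    have htn : ((cs.length : Int)).toNat = cs.length := by omega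
    rw [htn]
    exact hpad

-- the character A appends for one element
lemma toChars_bit (d : Int) :
    PySem.Int.toChars (if d == 0 then (0 : Int) else 1) = [pvBitChar d] := by
  by_cases hd : d = 0 <;> simp [hd, pvBitChar] <;> rfl

-- per-chunk equality: A's joined reversed bit string = B's zero-padded binary format
lemma chunk_eq (cs : List Int) (h : cs ≠ []) :
    PySem.Str.join "" (((cs.map (fun d => if d == 0 then (0 : Int) else 1)).reverse).map PySem.Int.toStr)
      = PySem.Str.zfill
          (PySem.Int.toBin ((PySem.List.enumerate cs).foldl
            (fun (v : Int) (kd : Int × Int) => if kd.2 != 0 then v + (1 : Int) <<< kd.1.toNat else v) 0))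
          (cs.length : Int) := by
  rw [enum_foldl_eq_pvVal cs 0 0 le_rfl]
  simp only [PySem.Str.join, PySem.Str.zfill]
  apply congrArg String.ofList
  have hbin : (PySem.Int.toBin ((0 : Int) + 2 ^ (0 : Int).toNat * (pvVal cs : Int))).toList
      = Nat.toDigits 2 (pvVal cs) := by
    rw [PySem.Int.toList_toBin]
    have h2 : ((0 : Int) + 2 ^ (0 : Int).toNat * (pvVal cs : Int)) = ((pvVal cs : Nat) : Int) := by
      simp
    rw [h2]
    simp [PySem.Int.toBinChars]
  rw [hbin, zfill_toDigits cs h]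
  have hmap : (((cs.map (fun d => if d == 0 then (0 : Int) else 1)).reverse).map PySem.Int.toStr).map
        String.toList
      = ((cs.map pvBitChar).reverse).map (fun c => [c]) := by
    rw [List.map_map, ← List.map_reverse, ← List.map_reverse, List.map_map, List.map_map]
    apply List.map_congr_left
    intro d _
    simp only [Function.comp_apply, PySem.Int.toList_toStr]
    exact toChars_bit d
  show PySem.Chars.join "".toList _ = _
  rw [hmap]
  have hj := PySem.Chars.join_nil_singletons ((cs.map pvBitChar).reverse)
  simpa using hj

-- ===== VERDICT (by name: the statement is the Claim_ definition above) =====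
theorem make_collision_data_str_spec : Claim_equal_make_collision_data_str := by
  intro data _
  unfold Spec_make_collision_data_str make_collision_data_str make_collision_data_str_alt
  simp only [List.length_map]
  rw [PySem.List.foldl_append_singleton_eq_map, PySem.List.foldl_append_singleton_eq_map]
  apply congrArg (PySem.Str.join ", ")
  simp only [List.nil_append]
  apply List.map_congr_left
  intro i hi
  rw [PySem.List.mem_pyRange_iff_of_pos (by norm_num)] at hi
  obtain ⟨h0, hlt, -⟩ := hi
  have h8 : (0 : Int) ≤ i + 8 := by omega
  rw [PySem.List.slice_toNat _ h0 h8, PySem.List.slice_toNat _ h0 h8]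
  have hmapsl : List.take ((i + 8).toNat - i.toNat)
        (List.drop i.toNat (data.map (fun d => if d == 0 then (0 : Int) else 1)))
      = (List.take ((i + 8).toNat - i.toNat) (List.drop i.toNat data)).map
          (fun d => if d == 0 then (0 : Int) else 1) := by
    rw [List.map_take, List.map_drop]
  have hne : List.take ((i + 8).toNat - i.toNat) (List.drop i.toNat data) ≠ [] := by
    have h88 : (i + 8).toNat - i.toNat = 8 := by omega
    have hdr : List.drop i.toNat data ≠ [] := by
      rw [ne_eq, List.drop_eq_nil_iff]
      omega
    rw [h88, ne_eq, List.take_eq_nil_iff]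
    simp [hdr]
  rw [hmapsl]
  apply congrArg (fun s => "0b" ++ s)
  exact chunk_eq _ hne
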